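-- pv_equiv track=rewrite | github.com/esquitx/2024 | day15/python/main.py | part1
-- ===== SOURCE A (Python) =====
-- MOVES = {'<': (0, -1), '>': (0, 1), '^': (-1, 0), 'v': (1, 0)}
--
-- def move_robot(warehouse_map, move):
--     robot = None
--     # find robot position
--     for i, row in enumerate(warehouse_map):
--         for j, cell in enumerate(row):
--             if cell == '@':
--                 robot = (i, j)
--                 break
--
--     if not robot:
--         return
--
--     new_x, new_y = robot[0] + MOVES[move][0], robot[1] + MOVES[move][1]
--
--     # Check if move is valid (not hitting a wall)
--     if warehouse_map[new_x][new_y] == '#':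
--         return
--
--     # If next position is empty, just move there
--     if warehouse_map[new_x][new_y] == '.':
--         warehouse_map[robot[0]][robot[1]] = '.'
--         warehouse_map[new_x][new_y] = '@'
--         return
--
--     # If next position has a box, try to push the entire block
--     if warehouse_map[new_x][new_y] == 'O':
--         box_positions = []
--         next_positions = []
--         check_x, check_y = new_x, new_y
--
--         # Find all connected boxes in the direction of movement
--         while check_x < len(warehouse_map) and check_y < len(warehouse_map[0]) and warehouse_map[check_x][check_y] == 'O':
--             box_positions.append((check_x, check_y))
--             next_x = check_x + MOVES[move][0]
--             next_y = check_y + MOVES[move][1]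
--             if next_x >= len(warehouse_map) or next_y >= len(warehouse_map[0]) or warehouse_map[next_x][next_y] == '#':
--                 return  # Can't push if we hit a wall
--             next_positions.append((next_x, next_y))
--             check_x = next_x
--             check_y = next_y
--
--         # Move all boxes one position
--         for pos_x, pos_y in box_positions:
--             warehouse_map[pos_x][pos_y] = '.'
--
--         for next_x, next_y in next_positions:
--             warehouse_map[next_x][next_y] = 'O'
--
--         # Move robot
--         warehouse_map[robot[0]][robot[1]] = '.'
--         warehouse_map[new_x][new_y] = '@'
--
-- def part1(data):
--
--     warehouse_map, moves = data
--
--     for move in moves: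
--         move_robot(warehouse_map, move)
--
--     # find boxes positions
--     boxes = []
--     for i, row in enumerate(warehouse_map):
--         for j, cell in enumerate(row):
--             if cell == 'O':
--                 boxes.append((i, j))
--
--     return sum([100*x + y for x, y in boxes])
-- ===== SOURCE B (Python) =====
-- MOVES = {'<': (0, -1), '>': (0, 1), '^': (-1, 0), 'v': (1, 0)}
--
-- def part1(data):
--     grid, moves = data
--     # locate the robot once; afterwards its position is tracked incrementally
--     robot = None
--     for i, row in enumerate(grid):
--         for j, cell in enumerate(row):
--             if cell == '@':
--                 robot = (i, j)
--     if robot is not None: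
--         for move in moves:
--             dx, dy = MOVES[move]
--             rx, ry = robot
--             tx, ty = rx + dx, ry + dy
--             fx, fy = tx, ty
--             while grid[fx][fy] == 'O':
--                 fx, fy = fx + dx, fy + dy
--             if grid[fx][fy] == '.':
--                 if (fx, fy) != (tx, ty):
--                     grid[fx][fy] = 'O'   # the whole box line shifts: one write
--                 grid[tx][ty] = '@'
--                 grid[rx][ry] = '.'
--                 robot = (tx, ty)
--     total = 0
--     for i, row in enumerate(grid):
--         for j, cell in enumerate(row):
--             if cell == 'O':
--                 total += 100 * i + j
--     return total
-- ===== Notes on version B (the rewrite author's own statement) =====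
-- stated objective: faster
-- what changed: B locates the robot once and threads its position through the move loop instead of rescanning the whole grid before every move, and pushes a line of boxes with a single scan to the first non-box cell plus two cell writes instead of collecting every box position and rewriting them all; the final score is a single accumulating pass instead of building a box list and summing a mapped copy.
-- outside the precondition, e.g. on part1(([['@', 'O']], '>')): A returns 1, B raises IndexError
import Mathlib
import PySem

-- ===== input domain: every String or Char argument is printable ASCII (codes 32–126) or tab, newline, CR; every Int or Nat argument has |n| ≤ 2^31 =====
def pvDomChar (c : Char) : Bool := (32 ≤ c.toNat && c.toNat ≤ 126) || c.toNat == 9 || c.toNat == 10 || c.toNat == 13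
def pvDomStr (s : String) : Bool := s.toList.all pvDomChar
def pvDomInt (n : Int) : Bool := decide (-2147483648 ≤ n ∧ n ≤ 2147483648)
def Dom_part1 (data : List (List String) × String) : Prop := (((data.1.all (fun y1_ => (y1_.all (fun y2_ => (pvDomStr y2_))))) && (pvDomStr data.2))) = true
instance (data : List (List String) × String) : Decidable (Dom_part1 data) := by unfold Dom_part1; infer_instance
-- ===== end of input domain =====

-- B finds the robot once and tracks its position through the moves instead of rescanning
-- the grid per move, and pushes a box line with one scan plus two writes; equivalence is
-- about the RETURN value only (Python A mutates the grid argument in place, B does too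
-- but with different intermediate writes).

-- shared low-level helpers: Python's g[i][j] read / g[i][j] = v write (exact on in-range
-- indices; an out-of-range read/write, an IndexError in Python, is excluded by Pre_)
def pyCell (g : List (List String)) (i j : Int) : String :=
  (PySem.List.pyGet? ((PySem.List.pyGet? g i).getD []) j).getD ""

def pySet2 (g : List (List String)) (i j : Int) (v : String) : List (List String) :=
  PySem.List.pySetD g i (PySem.List.pySetD ((PySem.List.pyGet? g i).getD []) j v)

-- MOVES[c]; none = KeyError (excluded by Pre_)
def movesDelta (c : Char) : Option (Int × Int) :=
  if c = '<' then some (0, -1)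
  else if c = '>' then some (0, 1)
  else if c = '^' then some (-1, 0)
  else if c = 'v' then some (1, 0)
  else none

-- ===== PORT A =====

-- inner robot-search loop of move_robot: first '@' of a row (the `break`)
def rowRobotA : List String → Int → Option Int
  | [], _ => none
  | c :: r, j => if c = "@" then some j else rowRobotA r (j + 1)

-- outer loop: the accumulator is overwritten by each row that contains '@'
def findRobotA : List (List String) → Int → Option (Int × Int) → Option (Int × Int)
  | [], _, acc => acc
  | row :: rest, i, acc =>
      findRobotA rest (i + 1)
        (match rowRobotA row 0 with
         | some j => some (i, j)
         | none => acc)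

-- the `while` collecting box_positions / next_positions; fuel only makes the loop total
-- (Python's loop always ends within len+len steps or raises; unreachable branch = some ([],[]))
def scanBoxesA (g : List (List String)) (dx dy : Int) :
    Nat → Int → Int → Option (List (Int × Int) × List (Int × Int))
  | 0, _, _ => some ([], [])
  | fuel + 1, cx, cy =>
    if cx < (g.length : Int) ∧ cy < (((g.headD []).length : Nat) : Int) ∧ pyCell g cx cy = "O" then
      if (g.length : Int) ≤ cx + dx ∨ (((g.headD []).length : Nat) : Int) ≤ cy + dy ∨
          pyCell g (cx + dx) (cy + dy) = "#" then
        none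
      else
        match scanBoxesA g dx dy fuel (cx + dx) (cy + dy) with
        | none => none
        | some (bs, ns) => some ((cx, cy) :: bs, (cx + dx, cy + dy) :: ns)
    else some ([], [])

def moveRobotA (g : List (List String)) (m : Char) : List (List String) :=
  match findRobotA g 0 none with
  | none => g
  | some (rx, ry) =>
    match movesDelta m with
    | none => g
    | some (dx, dy) =>
      let nx := rx + dx
      let ny := ry + dy
      if pyCell g nx ny = "#" then g
      else if pyCell g nx ny = "." then pySet2 (pySet2 g rx ry ".") nx ny "@"
      else if pyCell g nx ny = "O" then
        match scanBoxesA g dx dy (g.length + (g.headD []).length + 2) nx ny with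
        | none => g
        | some (bs, ns) =>
          let g1 := bs.foldl (fun h p => pySet2 h p.1 p.2 ".") g
          let g2 := ns.foldl (fun h p => pySet2 h p.1 p.2 "O") g1
          pySet2 (pySet2 g2 rx ry ".") nx ny "@"
      else g

-- final double loop building the boxes list
def boxesCellsA : List String → Int → Int → List (Int × Int) → List (Int × Int)
  | [], _, _, acc => acc
  | c :: r, i, j, acc => boxesCellsA r i (j + 1) (if c = "O" then acc ++ [(i, j)] else acc)

def boxesRowsA : List (List String) → Int → List (Int × Int) → List (Int × Int)
  | [], _, acc => acc
  | row :: rest, i, acc => boxesRowsA rest (i + 1) (boxesCellsA row i 0 acc)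

def part1 (data : List (List String) × String) : Int :=
  let gfin := data.2.toList.foldl (fun h m => moveRobotA h m) data.1
  ((boxesRowsA gfin 0 []).map (fun p => 100 * p.1 + p.2)).sum

-- ===== PORT B =====

-- B's robot search: one plain double loop, last '@' wins (no break)
def rowRobotB : List String → Int → Int → Option (Int × Int) → Option (Int × Int)
  | [], _, _, acc => acc
  | c :: r, i, j, acc => rowRobotB r i (j + 1) (if c = "@" then some (i, j) else acc)

def findRobotB : List (List String) → Int → Option (Int × Int) → Option (Int × Int)
  | [], _, acc => acc
  | row :: rest, i, acc => findRobotB rest (i + 1) (rowRobotB row i 0 acc)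

-- B's `while grid[fx][fy] == 'O'`; fuel only makes the loop total
def scanFreeB (g : List (List String)) (dx dy : Int) : Nat → Int → Int → Int × Int
  | 0, cx, cy => (cx, cy)
  | fuel + 1, cx, cy =>
    if pyCell g cx cy = "O" then scanFreeB g dx dy fuel (cx + dx) (cy + dy) else (cx, cy)

def stepB (st : List (List String) × (Int × Int)) (m : Char) : List (List String) × (Int × Int) :=
  match movesDelta m with
  | none => st
  | some (dx, dy) =>
    let g := st.1
    let tx := st.2.1 + dx
    let ty := st.2.2 + dy
    let f := scanFreeB g dx dy (g.length + (g.headD []).length + 2) tx ty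
    if pyCell g f.1 f.2 = "." then
      let g1 := if (f.1, f.2) ≠ (tx, ty) then pySet2 g f.1 f.2 "O" else g
      let g2 := pySet2 g1 tx ty "@"
      let g3 := pySet2 g2 st.2.1 st.2.2 "."
      (g3, (tx, ty))
    else st

-- B's single accumulating pass for the score
def sumCellsB : List String → Int → Int → Int → Int
  | [], _, _, t => t
  | c :: r, i, j, t => sumCellsB r i (j + 1) (if c = "O" then t + (100 * i + j) else t)

def sumRowsB : List (List String) → Int → Int → Int
  | [], _, t => t
  | row :: rest, i, t => sumRowsB rest (i + 1) (sumCellsB row i 0 t)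

def part1_alt (data : List (List String) × String) : Int :=
  match findRobotB data.1 0 none with
  | none => sumRowsB data.1 0 0
  | some r => sumRowsB (data.2.toList.foldl stepB (data.1, r)).1 0 0

-- ===== PRECONDITION & SPEC =====

-- When a robot exists and there is at least one move, Pre_ restricts to well-formed
-- puzzles: a rectangular grid, every border cell '#', every cell one of '#' '.' 'O' '@',
-- exactly one robot, and every move character one of '<' '>' '^' 'v'.  Outside it A
-- raises (KeyError on an unknown move, IndexError running off an unwalled grid) or
-- returns accidental values (negative-index wraparound, pushing boxes over non-wall
-- characters, and with several robots the accidental pick of the last row's robot).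
-- Without a robot, or without moves, nothing is restricted (the grid is never touched).
def Pre_part1 (data : List (List String) × String) : Prop :=
  "@" ∈ data.1.flatten → data.2.toList = [] ∨
    ((∀ row ∈ data.1, row.length = (data.1.headD []).length) ∧
     (∀ row ∈ data.1, ∀ c ∈ row, c = "#" ∨ c = "." ∨ c = "O" ∨ c = "@") ∧
     (data.1 ≠ [] → (data.1.headD []).all (· = "#") ∧ (data.1.getLastD []).all (· = "#")) ∧
     (∀ row ∈ data.1, row ≠ [] → row.headD "" = "#" ∧ row.getLastD "" = "#") ∧
     (data.1.flatten.count "@" ≤ 1) ∧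
     (data.2.toList.all (fun c => c == '<' || c == '>' || c == '^' || c == 'v')) = true)

instance (data : List (List String) × String) : Decidable (Pre_part1 data) := by
  unfold Pre_part1; infer_instance

def pvWitness_part1 : (List (List String) × String) :=
  ([["#", "#", "#", "#", "#"],
    ["#", "@", "O", ".", "#"],
    ["#", "#", "#", "#", "#"]], ">>")

def Spec_part1 (data : List (List String) × String) (out : Int) : Prop := out = part1_alt data
instance (data : List (List String) × String) (out : Int) : Decidable (Spec_part1 data out) := by
  unfold Spec_part1; infer_instance

-- ===== CLAIM (what is proved, stated in full; the proofs are below) =====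
def Claim_equal_part1 : Prop := ∀ (data : List (List String) × String), Dom_part1 data → Pre_part1 data → Spec_part1 data (part1 data)

-- ===== LEMMAS AND PROOFS =====

-- ---- proof-side abstractions: grid cells as a function, single-cell writes ----

def cellZ (g : List (List String)) (p : Int × Int) : String :=
  (g.getD p.1.toNat []).getD p.2.toNat ""

def setZ (g : List (List String)) (p : Int × Int) (v : String) : List (List String) :=
  g.set p.1.toNat ((g.getD p.1.toNat []).set p.2.toNat v)

def Rect (g : List (List String)) (C : Nat) : Prop := ∀ row ∈ g, row.length = C

def InB (g : List (List String)) (C : Nat) (p : Int × Int) : Prop :=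
  0 ≤ p.1 ∧ p.1 < g.length ∧ 0 ≤ p.2 ∧ p.2 < C

structure GInv (g : List (List String)) (C : Nat) : Prop where
  rect : Rect g C
  head : (g.headD []).length = C
  alpha : ∀ p, InB g C p → cellZ g p = "#" ∨ cellZ g p = "." ∨ cellZ g p = "O" ∨ cellZ g p = "@"
  border : ∀ p, InB g C p →
    (p.1 = 0 ∨ p.1 = (g.length : Int) - 1 ∨ p.2 = 0 ∨ p.2 = (C : Int) - 1) → cellZ g p = "#"
  uniq : ∀ p q, InB g C p → InB g C q → cellZ g p = "@" → cellZ g q = "@" → p = q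

def RobotAt (g : List (List String)) (C : Nat) (r : Int × Int) : Prop :=
  InB g C r ∧ cellZ g r = "@"

def Dir (dx dy : Int) : Prop :=
  (dx, dy) = (0, -1) ∨ (dx, dy) = (0, 1) ∨ (dx, dy) = (-1, 0) ∨ (dx, dy) = (1, 0)

def pAdd (p : Int × Int) (k : Nat) (dx dy : Int) : Int × Int :=
  (p.1 + (k : Int) * dx, p.2 + (k : Int) * dy)

-- ---- bridges between the ports' Python primitives and cellZ/setZ ----

theorem pyCell_eq (g : List (List String)) {p : Int × Int} (h1 : 0 ≤ p.1) (h2 : 0 ≤ p.2) :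
    pyCell g p.1 p.2 = cellZ g p := by
  rw [pyCell, PySem.List.pyGet?_of_nonneg _ h1, PySem.List.pyGet?_of_nonneg _ h2]
  simp [cellZ, List.getD_eq_getElem?_getD]

theorem pySet2_eq (g : List (List String)) {p : Int × Int} (h1 : 0 ≤ p.1) (h2 : 0 ≤ p.2)
    (v : String) : pySet2 g p.1 p.2 v = setZ g p v := by
  rw [pySet2, PySem.List.pyGet?_of_nonneg _ h1, PySem.List.pySetD_of_nonneg _ _ h2,
    PySem.List.pySetD_of_nonneg _ _ h1]
  simp [setZ, List.getD_eq_getElem?_getD]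

theorem setZ_oob {g : List (List String)} {p : Int × Int} (hn : ¬ p.1.toNat < g.length)
    (v : String) : setZ g p v = g := by
  rw [setZ, List.set_eq_of_length_le (by omega)]

theorem rowlen_setZ (g : List (List String)) (p : Int × Int) (v : String) (n : Nat) :
    ((setZ g p v).getD n []).length = (g.getD n []).length := by
  by_cases hn : p.1.toNat < g.length
  · unfold setZ
    rcases eq_or_ne n p.1.toNat with h | h
    · subst h
      simp only [List.getD_eq_getElem?_getD]
      rw [List.getElem?_set_self hn, List.getElem?_eq_getElem hn]
      simp
    · simp [List.getD_eq_getElem?_getD, List.getElem?_set_ne (Ne.symm h)]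
  · rw [setZ_oob hn]

theorem rect_setZ {g : List (List String)} {C : Nat} (hC : Rect g C) (p : Int × Int)
    (v : String) : Rect (setZ g p v) C := by
  intro row hrow
  by_cases hn : p.1.toNat < g.length
  · rcases List.mem_or_eq_of_mem_set hrow with h | h
    · exact hC row h
    · subst h
      rw [List.length_set, List.getD_eq_getElem?_getD, List.getElem?_eq_getElem hn]
      exact hC _ (List.getElem_mem hn)
  · rw [setZ_oob hn] at hrow
    exact hC row hrow

theorem cellZ_setZ_self {g : List (List String)} {C : Nat} (hC : Rect g C) {p : Int × Int}
    (hp : InB g C p) (v : String) : cellZ (setZ g p v) p = v := by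
  obtain ⟨h1, h2, h3, h4⟩ := hp
  have hi : p.1.toNat < g.length := by omega
  have hj : p.2.toNat < (g[p.1.toNat]?.getD []).length := by
    rw [List.getElem?_eq_getElem hi]
    simp only [Option.getD_some]
    rw [hC _ (List.getElem_mem hi)]; omega
  rw [cellZ, setZ]
  simp only [List.getD_eq_getElem?_getD]
  rw [List.getElem?_set_self hi]
  simp only [Option.getD_some]
  rw [List.getElem?_set_self hj]
  rfl
theorem cellZ_setZ_ne {g : List (List String)} {p t : Int × Int}
    (h1 : 0 ≤ p.1) (h2 : 0 ≤ p.2) (h3 : 0 ≤ t.1) (h4 : 0 ≤ t.2) (hne : t ≠ p) (v : String) :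
    cellZ (setZ g p v) t = cellZ g t := by
  have hcase : t.1.toNat ≠ p.1.toNat ∨ (t.1.toNat = p.1.toNat ∧ t.2.toNat ≠ p.2.toNat) := by
    rcases eq_or_ne t.1 p.1 with h | h
    · right
      refine ⟨by rw [h], fun hc => hne ?_⟩
      have : t.2 = p.2 := by omega
      exact Prod.ext (by rw [h]) this
    · left; omega
  rcases hcase with h | ⟨ha, hb⟩
  · simp [cellZ, setZ, List.getD_eq_getElem?_getD, List.getElem?_set_ne (Ne.symm h)]
  · by_cases hn : p.1.toNat < g.length
    · rw [cellZ, cellZ, setZ]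
      simp only [List.getD_eq_getElem?_getD, ha]
      rw [List.getElem?_set_self hn]
      simp only [Option.getD_some]
      rw [List.getElem?_set_ne (Ne.symm hb), List.getElem?_eq_getElem hn]
    · rw [setZ_oob hn]
theorem head_setZ (g : List (List String)) (p : Int × Int) (v : String) :
    ((setZ g p v).headD []).length = (g.headD []).length := by
  have h0 : ∀ (l : List (List String)), l.headD [] = l.getD 0 [] := by
    intro l; cases l <;> simp
  rw [h0, h0]
  exact rowlen_setZ g p v 0

theorem length_setZ (g : List (List String)) (p : Int × Int) (v : String) :
    (setZ g p v).length = g.length := by simp [setZ]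

theorem InB_setZ (g : List (List String)) (C : Nat) (p t : Int × Int) (v : String) :
    InB (setZ g p v) C t ↔ InB g C t := by
  unfold InB; rw [length_setZ]

theorem getD_set_self' (g : List (List String)) (i : Nat) (r : List String) (hi : i < g.length) :
    (g.set i r).getD i [] = r := by
  rw [List.getD_eq_getElem?_getD, List.getElem?_set_self hi]; rfl

theorem setZ_setZ_self (g : List (List String)) (p : Int × Int) (a b : String) :
    setZ (setZ g p a) p b = setZ g p b := by
  by_cases hn : p.1.toNat < g.length
  · unfold setZ
    rw [getD_set_self' _ _ _ hn, List.set_set, List.set_set]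
  · rw [setZ_oob hn, setZ_oob hn]

theorem setZ_comm (g : List (List String)) {p q : Int × Int}
    (h1 : 0 ≤ p.1) (h2 : 0 ≤ p.2) (h3 : 0 ≤ q.1) (h4 : 0 ≤ q.2) (hne : p ≠ q) (a b : String) :
    setZ (setZ g p a) q b = setZ (setZ g q b) p a := by
  have hcase : p.1.toNat ≠ q.1.toNat ∨ (p.1.toNat = q.1.toNat ∧ p.2.toNat ≠ q.2.toNat) := by
    rcases eq_or_ne p.1 q.1 with h | h
    · right
      refine ⟨by rw [h], fun hc => hne ?_⟩
      exact Prod.ext (by rw [h]) (by omega)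
    · left; omega
  by_cases hp : p.1.toNat < g.length
  · by_cases hq : q.1.toNat < g.length
    · rcases hcase with h | ⟨ha, hb⟩
      · unfold setZ
        rw [List.getD_eq_getElem?_getD (l := g.set p.1.toNat _),
          List.getElem?_set_ne h,
          List.getD_eq_getElem?_getD (l := g.set q.1.toNat _),
          List.getElem?_set_ne (Ne.symm h),
          List.set_comm _ _ h, ← List.getD_eq_getElem?_getD, ← List.getD_eq_getElem?_getD]
      · unfold setZ
        rw [ha] at *
        rw [getD_set_self' _ _ _ hq, getD_set_self' _ _ _ hq, List.set_set, List.set_set,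
          List.set_comm _ _ hb]
    · rw [setZ_oob (p := q) (by rw [length_setZ]; omega), setZ_oob (p := q) hq]
  · rw [setZ_oob hp, setZ_oob (p := p) (by rw [length_setZ]; omega)]

theorem setZ_self {g : List (List String)} {C : Nat} (hC : Rect g C) {p : Int × Int}
    (hp : InB g C p) (hv : cellZ g p = v) : setZ g p v = g := by
  obtain ⟨h1, h2, h3, h4⟩ := hp
  have hi : p.1.toNat < g.length := by omega
  have hj : p.2.toNat < (g.getD p.1.toNat []).length := by
    rw [List.getD_eq_getElem?_getD, List.getElem?_eq_getElem hi]
    simp only [Option.getD_some]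
    rw [hC _ (List.getElem_mem hi)]; omega
  rw [cellZ, List.getD_eq_getElem?_getD (l := (g.getD p.1.toNat [])),
    List.getElem?_eq_getElem hj] at hv
  simp only [Option.getD_some] at hv
  rw [setZ, ← hv, List.set_getElem_self, List.getD_eq_getElem?_getD,
    List.getElem?_eq_getElem hi]
  simp only [Option.getD_some]
  exact List.set_getElem_self hi

-- ---- the straight scan ray: cells from a start position up to the first non-'O' cell ----

inductive Ray (g : List (List String)) (C : Nat) (dx dy : Int) : Nat → Int × Int → Int × Int → Prop
  | stop (p : Int × Int) (hp : InB g C p) (h : cellZ g p ≠ "O") : Ray g C dx dy 0 p p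
  | step (p q : Int × Int) (n : Nat) (hp : InB g C p) (h : cellZ g p = "O")
      (t : Ray g C dx dy n (p.1 + dx, p.2 + dy) q) : Ray g C dx dy (n + 1) p q

theorem pAdd_zero (p : Int × Int) (dx dy : Int) : pAdd p 0 dx dy = p := by simp [pAdd]

theorem pAdd_one (p : Int × Int) (dx dy : Int) : pAdd p 1 dx dy = (p.1 + dx, p.2 + dy) := by
  simp [pAdd]

theorem pAdd_succ (p : Int × Int) (k : Nat) (dx dy : Int) :
    pAdd (p.1 + dx, p.2 + dy) k dx dy = pAdd p (k + 1) dx dy := by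
  simp only [pAdd]
  refine Prod.ext ?_ ?_ <;> push_cast <;> ring

theorem ray_start_InB {g C dx dy n p q} (h : Ray g C dx dy n p q) : InB g C p := by
  cases h with
  | stop _ hp _ => exact hp
  | step _ _ _ hp _ _ => exact hp

theorem ray_last {g C dx dy} : ∀ {n p q}, Ray g C dx dy n p q →
    InB g C q ∧ cellZ g q ≠ "O" := by
  intro n p q h
  induction h with
  | stop _ hp hc => exact ⟨hp, hc⟩
  | step _ _ _ _ _ _ ih => exact ih

theorem ray_stop_of_not_O {g C dx dy n p q} (h : Ray g C dx dy n p q)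
    (hc : cellZ g p ≠ "O") : q = p ∧ n = 0 := by
  cases h with
  | stop _ _ _ => exact ⟨rfl, rfl⟩
  | step _ _ _ _ hO _ => exact absurd hO hc

theorem ray_q {g C dx dy} : ∀ {n p q}, Ray g C dx dy n p q → q = pAdd p n dx dy := by
  intro n p q h
  induction h with
  | stop p _ _ => rw [pAdd_zero]
  | step p q n _ _ _ ih => rw [ih, pAdd_succ]

theorem ray_cells {g C dx dy} : ∀ {n p q}, Ray g C dx dy n p q →
    ∀ k, k < n → cellZ g (pAdd p k dx dy) = "O" ∧ InB g C (pAdd p k dx dy) := by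
  intro n p q h
  induction h with
  | stop _ _ _ => intro k hk; omega
  | step p q n hp hO _ ih =>
    intro k hk
    cases k with
    | zero => rw [pAdd_zero]; exact ⟨hO, hp⟩
    | succ k => rw [← pAdd_succ]; exact ih k (by omega)

-- directional distance to the far wall; decreases along a ray
def dirMeasure (g : List (List String)) (C : Nat) (dx dy : Int) (p : Int × Int) : Nat :=
  (if dx = 1 then (g.length : Int) - 1 - p.1
   else if dx = -1 then p.1
   else if dy = 1 then (C : Int) - 1 - p.2
   else p.2).toNat

theorem ray_exists_aux {g C dx dy} (inv : GInv g C) (hd : Dir dx dy) :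
    ∀ (m : Nat) (p : Int × Int), InB g C p → dirMeasure g C dx dy p ≤ m →
      ∃ n q, Ray g C dx dy n p q ∧ n ≤ dirMeasure g C dx dy p := by
  intro m
  induction m with
  | zero =>
    intro p hp hm
    by_cases hc : cellZ g p = "O"
    · exfalso
      obtain ⟨h1, h2, h3, h4⟩ := hp
      rcases hd with h | h | h | h <;> rw [Prod.ext_iff] at h <;>
        obtain ⟨e1, e2⟩ := h <;> subst e1 <;> subst e2 <;> simp [dirMeasure] at hm
      · exact absurd (inv.border p ⟨h1, h2, h3, h4⟩ (Or.inr (Or.inr (Or.inl (by omega)))))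
          (by rw [hc]; decide)
      · exact absurd (inv.border p ⟨h1, h2, h3, h4⟩ (Or.inr (Or.inr (Or.inr (by omega)))))
          (by rw [hc]; decide)
      · exact absurd (inv.border p ⟨h1, h2, h3, h4⟩ (Or.inl (by omega))) (by rw [hc]; decide)
      · exact absurd (inv.border p ⟨h1, h2, h3, h4⟩ (Or.inr (Or.inl (by omega))))
          (by rw [hc]; decide)
    · exact ⟨0, p, Ray.stop p hp hc, by omega⟩
  | succ m ih =>
    intro p hp hm
    by_cases hc : cellZ g p = "O"
    · have hnb : ¬ (p.1 = 0 ∨ p.1 = (g.length : Int) - 1 ∨ p.2 = 0 ∨ p.2 = (C : Int) - 1) →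
        True := fun _ => trivial
      have hB : ∀ (b : p.1 = 0 ∨ p.1 = (g.length : Int) - 1 ∨ p.2 = 0 ∨ p.2 = (C : Int) - 1),
          False := by
        intro b
        exact absurd (inv.border p hp b) (by rw [hc]; decide)
      obtain ⟨h1, h2, h3, h4⟩ := hp
      rcases hd with h | h | h | h <;> rw [Prod.ext_iff] at h <;>
        obtain ⟨e1, e2⟩ := h <;> subst e1 <;> subst e2
      · -- '<' : dy = -1
        have hz : p.2 ≠ 0 := fun hb => hB (Or.inr (Or.inr (Or.inl hb)))
        have hp' : InB g C (p.1 + 0, p.2 + (-1)) := ⟨by omega, by omega, by omega, by omega⟩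
        obtain ⟨n, q, hr, hn⟩ := ih _ hp' (by simp [dirMeasure] at hm ⊢; omega)
        exact ⟨n + 1, q, Ray.step p q n ⟨h1, h2, h3, h4⟩ hc hr,
          by simp [dirMeasure] at hn ⊢; omega⟩
      · -- '>' : dy = 1
        have hz : p.2 ≠ (C : Int) - 1 := fun hb => hB (Or.inr (Or.inr (Or.inr hb)))
        have hp' : InB g C (p.1 + 0, p.2 + 1) := ⟨by omega, by omega, by omega, by omega⟩
        obtain ⟨n, q, hr, hn⟩ := ih _ hp' (by simp [dirMeasure] at hm ⊢; omega)
        exact ⟨n + 1, q, Ray.step p q n ⟨h1, h2, h3, h4⟩ hc hr,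
          by simp [dirMeasure] at hn ⊢; omega⟩
      · -- '^' : dx = -1
        have hz : p.1 ≠ 0 := fun hb => hB (Or.inl hb)
        have hp' : InB g C (p.1 + (-1), p.2 + 0) := ⟨by omega, by omega, by omega, by omega⟩
        obtain ⟨n, q, hr, hn⟩ := ih _ hp' (by simp [dirMeasure] at hm ⊢; omega)
        exact ⟨n + 1, q, Ray.step p q n ⟨h1, h2, h3, h4⟩ hc hr,
          by simp [dirMeasure] at hn ⊢; omega⟩
      · -- 'v' : dx = 1
        have hz : p.1 ≠ (g.length : Int) - 1 := fun hb => hB (Or.inr (Or.inl hb))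
        have hp' : InB g C (p.1 + 1, p.2 + 0) := ⟨by omega, by omega, by omega, by omega⟩
        obtain ⟨n, q, hr, hn⟩ := ih _ hp' (by simp [dirMeasure] at hm ⊢; omega)
        exact ⟨n + 1, q, Ray.step p q n ⟨h1, h2, h3, h4⟩ hc hr,
          by simp [dirMeasure] at hn ⊢; omega⟩
    · exact ⟨0, p, Ray.stop p hp hc, by omega⟩

theorem ray_exists {g C dx dy} (inv : GInv g C) (hd : Dir dx dy) (p : Int × Int)
    (hp : InB g C p) : ∃ n q, Ray g C dx dy n p q ∧ n ≤ g.length + C := by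
  obtain ⟨n, q, hr, hn⟩ := ray_exists_aux inv hd (dirMeasure g C dx dy p) p hp le_rfl
  refine ⟨n, q, hr, le_trans hn ?_⟩
  obtain ⟨h1, h2, h3, h4⟩ := hp
  unfold dirMeasure
  split_ifs <;> omega

-- ---- the two scans, related to the ray ----

theorem scanFreeB_ray {g : List (List String)} {C : Nat} {dx dy : Int} :
    ∀ {n p q}, Ray g C dx dy n p q → ∀ fuel, n < fuel →
      scanFreeB g dx dy fuel p.1 p.2 = q := by
  intro n p q h
  induction h with
  | stop p hp hc =>
    intro fuel hf
    cases fuel with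
    | zero => omega
    | succ f =>
      rw [scanFreeB, pyCell_eq g hp.1 hp.2.2.1, if_neg hc]
  | step p q n hp hO t ih =>
    intro fuel hf
    cases fuel with
    | zero => omega
    | succ f =>
      rw [scanFreeB, pyCell_eq g hp.1 hp.2.2.1, if_pos hO]
      exact ih f (by omega)

theorem scanA_ray {g : List (List String)} {C : Nat} {dx dy : Int} (inv : GInv g C) :
    ∀ {n p q}, Ray g C dx dy n p q → ∀ fuel, n < fuel →
    (cellZ g p = "O" → cellZ g q = "#" → scanBoxesA g dx dy fuel p.1 p.2 = none) ∧
    (cellZ g q ≠ "#" → scanBoxesA g dx dy fuel p.1 p.2 =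
      some ((List.range n).map (fun k => pAdd p k dx dy),
            (List.range n).map (fun k => pAdd p (k + 1) dx dy))) := by
  intro n p q h
  induction h with
  | stop p hp hc =>
    intro fuel hf
    cases fuel with
    | zero => omega
    | succ f =>
      constructor
      · intro hO; exact absurd hO hc
      · intro _
        rw [scanBoxesA, if_neg]
        · simp
        · rw [pyCell_eq g hp.1 hp.2.2.1]
          intro hcond
          exact hc hcond.2.2
  | step p q n hp hO t ih =>
    intro fuel hf
    cases fuel with
    | zero => omega
    | succ f =>
      have hnext : InB g C (p.1 + dx, p.2 + dy) := ray_start_InB t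
      have hcond : p.1 < (g.length : Int) ∧ p.2 < (((g.headD []).length : Nat) : Int) ∧
          pyCell g p.1 p.2 = "O" := by
        rw [pyCell_eq g hp.1 hp.2.2.1, inv.head]
        exact ⟨hp.2.1, hp.2.2.2, hO⟩
      by_cases hnextHash : cellZ g (p.1 + dx, p.2 + dy) = "#"
      · have hq : q = (p.1 + dx, p.2 + dy) :=
          (ray_stop_of_not_O t (by rw [hnextHash]; decide)).1
        rw [scanBoxesA, if_pos hcond, if_pos]
        · constructor
          · intro _ _; rfl
          · intro hqh; rw [hq] at hqh; exact absurd hnextHash hqh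
        · right; right
          rw [pyCell_eq g hnext.1 hnext.2.2.1]
          exact hnextHash
      · rw [scanBoxesA, if_pos hcond, if_neg]
        · obtain ⟨ih1, ih2⟩ := ih f (by omega)
          by_cases hqh : cellZ g q = "#"
          · have hnextO : cellZ g (p.1 + dx, p.2 + dy) = "O" := by
              by_contra hno
              rw [(ray_stop_of_not_O t hno).1] at hqh
              exact hnextHash hqh
            rw [ih1 hnextO hqh]
            exact ⟨fun _ _ => rfl, fun hc => absurd hqh hc⟩
          · rw [ih2 hqh]
            refine ⟨fun _ hcq => absurd hcq hqh, fun _ => ?_⟩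
            have hbs : (List.range (n + 1)).map (fun k => pAdd p k dx dy) =
                (p.1, p.2) :: (List.range n).map (fun k => pAdd (p.1 + dx, p.2 + dy) k dx dy) := by
              rw [List.range_succ_eq_map, List.map_cons, List.map_map, pAdd_zero]
              refine congrArg₂ _ rfl (List.map_congr_left fun k _ => ?_)
              simp only [Function.comp_apply, pAdd_succ]
            have hns : (List.range (n + 1)).map (fun k => pAdd p (k + 1) dx dy) =
                (p.1 + dx, p.2 + dy) ::
                  (List.range n).map (fun k => pAdd (p.1 + dx, p.2 + dy) (k + 1) dx dy) := by
              rw [List.range_succ_eq_map, List.map_cons, List.map_map, pAdd_one]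
              refine congrArg₂ _ rfl (List.map_congr_left fun k _ => ?_)
              simp only [Function.comp_apply, pAdd_succ]
            rw [hbs, hns]
        · rw [pyCell_eq g hnext.1 hnext.2.2.1]
          obtain ⟨hb1, hb2, hb3, hb4⟩ := hnext
          rintro (hc | hc | hc)
          · omega
          · rw [inv.head] at hc; omega
          · exact hnextHash hc

-- ---- net effect of A's two write loops over a pushed box line ----

theorem pAdd_add (p : Int × Int) (a b : Nat) (dx dy : Int) :
    pAdd (pAdd p a dx dy) b dx dy = pAdd p (a + b) dx dy := by
  simp only [pAdd]
  refine Prod.ext ?_ ?_ <;> push_cast <;> ring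

theorem pAdd_inj {dx dy : Int} (hd : Dir dx dy) {p : Int × Int} {a b : Nat}
    (h : pAdd p a dx dy = pAdd p b dx dy) : a = b := by
  rw [Prod.ext_iff] at h
  rcases hd with hD | hD | hD | hD <;> rw [Prod.ext_iff] at hD <;>
    obtain ⟨e1, e2⟩ := hD <;> subst e1 <;> subst e2 <;>
    simp only [pAdd, mul_zero, mul_one, mul_neg] at h <;> omega

theorem range_map_pAdd (n : Nat) (p : Int × Int) (dx dy : Int) (c : Nat) :
    (List.range (n + 1)).map (fun k => pAdd p (k + c) dx dy) =
      pAdd p c dx dy ::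
        (List.range n).map (fun k => pAdd (p.1 + dx, p.2 + dy) (k + c) dx dy) := by
  rw [List.range_succ_eq_map, List.map_cons, List.map_map]
  refine congrArg₂ _ (by simp) (List.map_congr_left fun k _ => ?_)
  simp only [Function.comp_apply, Nat.succ_eq_add_one, pAdd_succ]
  congr 1
  omega

theorem foldl_pySet2_eq (v : String) :
    ∀ (l : List (Int × Int)) (h : List (List String)),
      (∀ x ∈ l, 0 ≤ x.1 ∧ 0 ≤ x.2) →
      l.foldl (fun h p => pySet2 h p.1 p.2 v) h = l.foldl (fun h p => setZ h p v) h := by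
  intro l
  induction l with
  | nil => intro h _; rfl
  | cons x xs ih =>
    intro h hl
    simp only [List.foldl_cons]
    rw [pySet2_eq h (hl x (by simp)).1 (hl x (by simp)).2]
    exact ih _ fun y hy => hl y (by simp [hy])

theorem foldSet_comm (v w : String) {t : Int × Int} (ht1 : 0 ≤ t.1) (ht2 : 0 ≤ t.2) :
    ∀ (l : List (Int × Int)) (h : List (List String)),
      (∀ x ∈ l, x ≠ t ∧ 0 ≤ x.1 ∧ 0 ≤ x.2) →
      l.foldl (fun h p => setZ h p v) (setZ h t w) =
        setZ (l.foldl (fun h p => setZ h p v) h) t w := by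
  intro l
  induction l with
  | nil => intro h _; rfl
  | cons x xs ih =>
    intro h hl
    obtain ⟨hne, hx1, hx2⟩ := hl x (by simp)
    simp only [List.foldl_cons]
    rw [setZ_comm h ht1 ht2 hx1 hx2 (Ne.symm hne)]
    exact ih _ fun y hy => hl y (by simp [hy])

theorem writes_net {dx dy : Int} (hd : Dir dx dy) :
    ∀ (n : Nat) (p : Int × Int) (h : List (List String)) (C : Nat), Rect h C →
      (∀ k : Nat, k ≤ n → InB h C (pAdd p k dx dy)) →
      (∀ k : Nat, k < n → cellZ h (pAdd p k dx dy) = "O") → 1 ≤ n →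
      ((List.range n).map (fun k => pAdd p (k + 1) dx dy)).foldl (fun h p => setZ h p "O")
          (((List.range n).map (fun k => pAdd p k dx dy)).foldl (fun h p => setZ h p ".") h) =
        setZ (setZ h p ".") (pAdd p n dx dy) "O" := by
  intro n
  induction n with
  | zero => intro _ _ _ _ _ _ h1; omega
  | succ n ih =>
    intro p h C hC hIn hO _
    by_cases hn : 1 ≤ n
    · -- at least two boxes
      have hnn : ∀ k : Nat, k ≤ n + 1 → 0 ≤ (pAdd p k dx dy).1 ∧ 0 ≤ (pAdd p k dx dy).2 :=
        fun k hk => ⟨(hIn k hk).1, (hIn k hk).2.2.1⟩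
      have hp0 : 0 ≤ p.1 ∧ 0 ≤ p.2 := by
        have := hnn 0 (by omega); rwa [pAdd_zero] at this
      set p' : Int × Int := (p.1 + dx, p.2 + dy) with hp'
      have hp'1 : p' = pAdd p 1 dx dy := (pAdd_one p dx dy).symm
      have hp'nn : 0 ≤ p'.1 ∧ 0 ≤ p'.2 := by
        rw [hp'1]; exact hnn 1 (by omega)
      have hL1 : (List.range (n + 1)).map (fun k => pAdd p k dx dy) =
          p :: (List.range n).map (fun k => pAdd p' k dx dy) := by
        have := range_map_pAdd n p dx dy 0
        simpa [pAdd_zero] using this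
      have hL2 : (List.range (n + 1)).map (fun k => pAdd p (k + 1) dx dy) =
          p' :: (List.range n).map (fun k => pAdd p' (k + 1) dx dy) := by
        have := range_map_pAdd n p dx dy 1
        rw [← hp'1] at this
        exact this
      rw [hL1, hL2]
      simp only [List.foldl_cons]
      have hcomm : ((List.range n).map (fun k => pAdd p' (k + 1) dx dy)).foldl
            (fun h p => setZ h p "O")
            (setZ (((List.range n).map (fun k => pAdd p' k dx dy)).foldl
              (fun h p => setZ h p ".") (setZ h p ".")) p' "O") =
          setZ (((List.range n).map (fun k => pAdd p' (k + 1) dx dy)).foldl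
            (fun h p => setZ h p "O")
            (((List.range n).map (fun k => pAdd p' k dx dy)).foldl
              (fun h p => setZ h p ".") (setZ h p "."))) p' "O" := by
        refine foldSet_comm _ _ hp'nn.1 hp'nn.2 _ _ ?_
        intro x hx
        simp only [List.mem_map, List.mem_range] at hx
        obtain ⟨k, hk, hkx⟩ := hx
        subst hkx
        rw [hp'1, pAdd_add]
        refine ⟨fun hcontra => by have := pAdd_inj hd hcontra; omega, ?_⟩
        exact hnn (1 + (k + 1)) (by omega)
      rw [hcomm]
      have hIH := ih p' (setZ h p ".") C (rect_setZ hC p ".") ?_ ?_ hn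
      · rw [hIH]
        have hQ' : pAdd p' n dx dy = pAdd p (n + 1) dx dy := by
          rw [hp'1, pAdd_add, Nat.add_comm]
        rw [hQ']
        have hQnn := hnn (n + 1) (by omega)
        have hne1 : pAdd p (n + 1) dx dy ≠ p' := by
          rw [hp'1]; intro hcontra; have := pAdd_inj hd hcontra; omega
        have hnep : p' ≠ p := by
          rw [hp'1]
          intro hcontra
          have := pAdd_inj hd (hcontra.trans (pAdd_zero p dx dy).symm); omega
        rw [setZ_comm _ hQnn.1 hQnn.2 hp'nn.1 hp'nn.2 hne1, setZ_setZ_self]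
        have hself : setZ (setZ h p ".") p' "O" = setZ h p "." := by
          refine setZ_self (rect_setZ hC p ".") ?_ ?_
          · rw [(InB_setZ h C p p' ".")]
            rw [hp'1]; exact hIn 1 (by omega)
          · rw [cellZ_setZ_ne hp0.1 hp0.2 hp'nn.1 hp'nn.2 hnep "."]
            rw [hp'1]; exact hO 1 (by omega)
        rw [hself]
      · intro k hk
        rw [InB_setZ, hp'1, pAdd_add]
        exact hIn (1 + k) (by omega)
      · intro k hk
        have hknn := hnn (1 + k) (by omega)
        rw [hp'1, pAdd_add]
        rw [cellZ_setZ_ne hp0.1 hp0.2 hknn.1 hknn.2 ?_ "."]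
        · exact hO (1 + k) (by omega)
        · intro hcontra
          have := pAdd_inj hd (hcontra.trans (pAdd_zero p dx dy).symm); omega
    · -- exactly one box
      have hn1 : n = 0 := by omega
      subst hn1
      simp [List.range_one, pAdd_zero]

-- ---- the final score: A's box list + mapped sum equals B's accumulating pass ----

theorem boxesCellsA_acc : ∀ (row : List String) (i j0 : Int) (acc : List (Int × Int)),
    boxesCellsA row i j0 acc = acc ++ boxesCellsA row i j0 [] := by
  intro row
  induction row with
  | nil => intro i j0 acc; simp [boxesCellsA]
  | cons c r ih =>
    intro i j0 acc
    rw [boxesCellsA, boxesCellsA]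
    by_cases hc : c = "O"
    · rw [if_pos hc, if_pos hc, ih i (j0 + 1) (acc ++ [(i, j0)]),
        ih i (j0 + 1) ([] ++ [(i, j0)])]
      simp
    · rw [if_neg hc, if_neg hc, ih i (j0 + 1) acc]

theorem boxesRowsA_acc : ∀ (rows : List (List String)) (i0 : Int) (acc : List (Int × Int)),
    boxesRowsA rows i0 acc = acc ++ boxesRowsA rows i0 [] := by
  intro rows
  induction rows with
  | nil => intro i0 acc; simp [boxesRowsA]
  | cons row rest ih =>
    intro i0 acc
    rw [boxesRowsA, boxesRowsA, boxesCellsA_acc row i0 0 acc, ih (i0 + 1) (acc ++ _),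
      ih (i0 + 1) (boxesCellsA row i0 0 [])]
    simp

theorem sumCellsB_acc : ∀ (row : List String) (i j0 t : Int),
    sumCellsB row i j0 t = t + sumCellsB row i j0 0 := by
  intro row
  induction row with
  | nil => intro i j0 t; simp [sumCellsB]
  | cons c r ih =>
    intro i j0 t
    rw [sumCellsB, sumCellsB]
    by_cases hc : c = "O"
    · rw [if_pos hc, if_pos hc, ih i (j0 + 1) (t + (100 * i + j0)),
        ih i (j0 + 1) (0 + (100 * i + j0))]
      ring
    · rw [if_neg hc, if_neg hc]
      exact ih i (j0 + 1) t

theorem sumRowsB_acc : ∀ (rows : List (List String)) (i0 t : Int),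
    sumRowsB rows i0 t = t + sumRowsB rows i0 0 := by
  intro rows
  induction rows with
  | nil => intro i0 t; simp [sumRowsB]
  | cons row rest ih =>
    intro i0 t
    rw [sumRowsB, sumRowsB, sumCellsB_acc row i0 0 t, ih (i0 + 1) (t + _),
      ih (i0 + 1) (sumCellsB row i0 0 0)]
    ring

theorem sum_row_eq : ∀ (row : List String) (i j0 : Int),
    ((boxesCellsA row i j0 []).map (fun p => 100 * p.1 + p.2)).sum = sumCellsB row i j0 0 := by
  intro row
  induction row with
  | nil => intro i j0; simp [boxesCellsA, sumCellsB]
  | cons c r ih =>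
    intro i j0
    rw [boxesCellsA, sumCellsB]
    by_cases hc : c = "O"
    · rw [if_pos hc, if_pos hc, boxesCellsA_acc r i (j0 + 1) ([] ++ [(i, j0)]),
        sumCellsB_acc r i (j0 + 1) (0 + (100 * i + j0))]
      simp [ih i (j0 + 1)]
    · rw [if_neg hc, if_neg hc]
      exact ih i (j0 + 1)

theorem sum_eq : ∀ (rows : List (List String)) (i0 : Int),
    ((boxesRowsA rows i0 []).map (fun p => 100 * p.1 + p.2)).sum = sumRowsB rows i0 0 := by
  intro rows
  induction rows with
  | nil => intro i0; simp [boxesRowsA, sumRowsB]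
  | cons row rest ih =>
    intro i0
    rw [boxesRowsA, sumRowsB, boxesRowsA_acc rest (i0 + 1) (boxesCellsA row i0 0 []),
      sumRowsB_acc rest (i0 + 1) (sumCellsB row i0 0 0)]
    simp [ih (i0 + 1), sum_row_eq row i0 0]

-- ---- locating the robot: A's break-per-row double loop, B's plain last-wins loop ----

theorem rowRobotA_none : ∀ (row : List String), "@" ∉ row → ∀ j0, rowRobotA row j0 = none := by
  intro row
  induction row with
  | nil => intro _ _; rfl
  | cons c r ih =>
    intro hmem j0
    rw [rowRobotA, if_neg (by intro hc; exact hmem (by rw [hc]; simp))]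
    exact ih (fun hc => hmem (by simp [hc])) _

theorem rowRobotA_first : ∀ (row : List String) (k : Nat) (j0 : Int) (hk : k < row.length),
    row[k] = "@" → (∀ k', (hk' : k' < k) → row[k']'(by omega) ≠ "@") →
    rowRobotA row j0 = some (j0 + k) := by
  intro row
  induction row with
  | nil => intro k _ hk; simp at hk
  | cons c r ih =>
    intro k j0 hk hat hfirst
    cases k with
    | zero => rw [rowRobotA, if_pos (by simpa using hat)]; simp
    | succ k =>
      rw [rowRobotA, if_neg (by simpa using hfirst 0 (by omega))]
      rw [ih k (j0 + 1) (by simpa using hk) (by simpa using hat)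
        (fun k' hk' => by simpa using hfirst (k' + 1) (by omega))]
      congr 1
      push_cast
      ring

theorem findRobotA_none : ∀ (rows : List (List String)), (∀ row ∈ rows, "@" ∉ row) →
    ∀ i0 acc, findRobotA rows i0 acc = acc := by
  intro rows
  induction rows with
  | nil => intro _ _ _; rfl
  | cons row rest ih =>
    intro hno i0 acc
    simp only [findRobotA]
    rw [rowRobotA_none row (hno row (by simp)) 0]
    exact ih (fun r hr => hno r (by simp [hr])) _ _

theorem findRobotA_found : ∀ (rows : List (List String)) (t k : Nat) (i0 : Int) (acc : Option (Int × Int))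
    (ht : t < rows.length) (hk : k < rows[t].length),
    rows[t][k] = "@" → (∀ k', (hk' : k' < k) → rows[t][k']'(by omega) ≠ "@") →
    (∀ s, (hs : s < rows.length) → s ≠ t → "@" ∉ rows[s]) →
    findRobotA rows i0 acc = some (i0 + (t : Int), (k : Int)) := by
  intro rows
  induction rows with
  | nil => intro t _ _ _ ht; simp at ht
  | cons row rest ih =>
    intro t k i0 acc ht hk hat hfirst hother
    cases t with
    | zero =>
      simp only [findRobotA]
      rw [rowRobotA_first row k 0 (by simpa using hk) (by simpa using hat)
        (fun k' hk' => by simpa using hfirst k' hk')]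
      rw [findRobotA_none rest (fun r hr => by
        obtain ⟨s, hs, hrs⟩ := List.mem_iff_getElem.mp hr
        exact fun hmem => hother (s + 1) (by simpa using hs) (by omega) (by simpa [hrs] using hmem))]
      simp
    | succ t =>
      simp only [findRobotA]
      rw [rowRobotA_none row (by simpa using hother 0 (by omega) (by omega)) 0]
      have hmain := ih t k (i0 + 1) acc (by simpa using ht) (by simpa using hk)
        (by simpa using hat) (fun k' hk' => by simpa using hfirst k' hk')
        (fun s hs hst => by simpa using hother (s + 1) (by simpa using hs) (by omega))
      refine hmain.trans ?_
      congr 2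
      push_cast
      ring

theorem rowRobotB_none : ∀ (row : List String) (i : Int), "@" ∉ row →
    ∀ j0 acc, rowRobotB row i j0 acc = acc := by
  intro row i
  induction row with
  | nil => intro _ _ _; rfl
  | cons c r ih =>
    intro hmem j0 acc
    rw [rowRobotB, if_neg (by intro hc; exact hmem (by rw [hc]; simp))]
    exact ih (fun hc => hmem (by simp [hc])) _ _

theorem rowRobotB_unique : ∀ (row : List String) (i : Int) (k : Nat) (j0 : Int) (acc : Option (Int × Int))
    (hk : k < row.length), row[k] = "@" →
    (∀ k', (hk' : k' < row.length) → row[k'] = "@" → k' = k) →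
    rowRobotB row i j0 acc = some (i, j0 + k) := by
  intro row i
  induction row with
  | nil => intro k _ _ hk; simp at hk
  | cons c r ih =>
    intro k j0 acc hk hat huniq
    cases k with
    | zero =>
      rw [rowRobotB, if_pos (by simpa using hat)]
      rw [rowRobotB_none r i (fun hmem => by
        obtain ⟨s, hs, hrs⟩ := List.mem_iff_getElem.mp hmem
        exact absurd (huniq (s + 1) (by simpa using hs) (by simp [hrs])) (by omega))]
      simp
    | succ k =>
      rw [rowRobotB, if_neg (by simpa using fun hc => absurd (huniq 0 (by omega) (by simpa using hc)) (by omega))]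
      rw [ih k (j0 + 1) _ (by simpa using hk) (by simpa using hat)
        (fun k' hk' hat' => by
          have := huniq (k' + 1) (by simpa using hk') (by simpa using hat')
          omega)]
      congr 2
      push_cast
      ring

theorem findRobotB_none : ∀ (rows : List (List String)), (∀ row ∈ rows, "@" ∉ row) →
    ∀ i0 acc, findRobotB rows i0 acc = acc := by
  intro rows
  induction rows with
  | nil => intro _ _ _; rfl
  | cons row rest ih =>
    intro hno i0 acc
    simp only [findRobotB]
    rw [rowRobotB_none row i0 (hno row (by simp)) 0]
    exact ih (fun r hr => hno r (by simp [hr])) _ _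

theorem findRobotB_found : ∀ (rows : List (List String)) (t k : Nat) (i0 : Int) (acc : Option (Int × Int))
    (ht : t < rows.length) (hk : k < rows[t].length),
    rows[t][k] = "@" → (∀ k', (hk' : k' < rows[t].length) → rows[t][k'] = "@" → k' = k) →
    (∀ s, (hs : s < rows.length) → s ≠ t → "@" ∉ rows[s]) →
    findRobotB rows i0 acc = some (i0 + (t : Int), (k : Int)) := by
  intro rows
  induction rows with
  | nil => intro t _ _ _ ht; simp at ht
  | cons row rest ih =>
    intro t k i0 acc ht hk hat huniq hother
    cases t with
    | zero =>
      simp only [findRobotB]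
      rw [rowRobotB_unique row i0 k 0 acc (by simpa using hk) (by simpa using hat)
        (fun k' hk' hat' => by simpa using huniq k' (by simpa using hk') (by simpa using hat'))]
      rw [findRobotB_none rest (fun r hr => by
        obtain ⟨s, hs, hrs⟩ := List.mem_iff_getElem.mp hr
        exact fun hmem => hother (s + 1) (by simpa using hs) (by omega) (by simpa [hrs] using hmem))]
      simp
    | succ t =>
      simp only [findRobotB]
      rw [rowRobotB_none row i0 (by simpa using hother 0 (by omega) (by omega)) 0]
      have hmain := ih t k (i0 + 1) acc (by simpa using ht) (by simpa using hk)
        (by simpa using hat)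
        (fun k' hk' hat' => by simpa using huniq k' (by simpa using hk') (by simpa using hat'))
        (fun s hs hst => by simpa using hother (s + 1) (by simpa using hs) (by omega))
      refine hmain.trans ?_
      congr 2
      push_cast
      ring

-- ---- one move: A's move_robot equals B's tracked step, and the invariant survives ----

theorem movesDelta_dir {m : Char} {dx dy : Int} (h : movesDelta m = some (dx, dy)) :
    Dir dx dy := by
  unfold movesDelta at h
  split_ifs at h <;> injection h with h' <;>
    [exact Or.inl h'.symm; exact Or.inr (Or.inl h'.symm);
     exact Or.inr (Or.inr (Or.inl h'.symm)); exact Or.inr (Or.inr (Or.inr h'.symm))]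

theorem ray_pos_of_O {g C dx dy n p q} (h : Ray g C dx dy n p q)
    (hO : cellZ g p = "O") : 1 ≤ n := by
  cases h with
  | stop _ _ hc => exact absurd hO hc
  | step _ _ _ _ _ _ => omega

theorem cellZ_setZ' {g : List (List String)} {C : Nat} (hC : Rect g C) {p t : Int × Int}
    (hp : InB g C p) (ht1 : 0 ≤ t.1) (ht2 : 0 ≤ t.2) (v : String) :
    cellZ (setZ g p v) t = if t = p then v else cellZ g t := by
  by_cases h : t = p
  · rw [if_pos h, h]; exact cellZ_setZ_self hC hp v
  · rw [if_neg h]; exact cellZ_setZ_ne hp.1 hp.2.2.1 ht1 ht2 h v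

theorem findRobot_eq {g : List (List String)} {C : Nat} (inv : GInv g C) {r : Int × Int}
    (hr : RobotAt g C r) :
    findRobotA g 0 none = some r ∧ findRobotB g 0 none = some r := by
  obtain ⟨⟨h1, h2, h3, h4⟩, hat⟩ := hr
  have hre : r = ((r.1.toNat : Int), (r.2.toNat : Int)) := by
    refine Prod.ext ?_ ?_ <;> simp <;> omega
  set i := r.1.toNat
  set j := r.2.toNat
  have hi : i < g.length := by omega
  have hrowlen : g[i].length = C := inv.rect _ (List.getElem_mem hi)
  have hj : j < g[i].length := by omega
  have hcell : ∀ (s k : Nat) (hs : s < g.length) (hk : k < g[s].length),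
      g[s][k] = cellZ g ((s : Int), (k : Int)) := by
    intro s k hs hk
    simp [cellZ, List.getD_eq_getElem?_getD, List.getElem?_eq_getElem hs,
      List.getElem?_eq_getElem hk]
  have hat' : g[i][j] = "@" := by
    rw [hcell i j hi hj, ← hre, hat]
  have huniqrow : ∀ k', (hk' : k' < g[i].length) → g[i][k'] = "@" → k' = j := by
    intro k' hk' h'
    rw [hcell i k' hi hk'] at h'
    rw [hrowlen] at hk'
    have hmain := inv.uniq ((i : Int), (k' : Int)) r
      ⟨by simp, by simp; omega, by simp, by simp; omega⟩ ⟨h1, h2, h3, h4⟩ h' hat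
    have h2' := congrArg Prod.snd hmain
    simp at h2'
    omega
  have hother : ∀ s, (hs : s < g.length) → s ≠ i → "@" ∉ g[s] := by
    intro s hs hsne hmem
    obtain ⟨k, hk, hks⟩ := List.mem_iff_getElem.mp hmem
    rw [hcell s k hs hk] at hks
    have hlen : g[s].length = C := inv.rect _ (List.getElem_mem hs)
    rw [hlen] at hk
    have hmain := inv.uniq ((s : Int), (k : Int)) r
      ⟨by simp, by simp; omega, by simp, by simp; omega⟩ ⟨h1, h2, h3, h4⟩ hks hat
    have h1' := congrArg Prod.fst hmain
    simp at h1'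
    omega
  constructor
  · rw [findRobotA_found g i j 0 none hi hj hat'
      (fun k' hk' => fun hc => absurd (huniqrow k' (by omega) hc) (by omega)) hother]
    rw [hre]; simp
  · rw [findRobotB_found g i j 0 none hi hj hat' huniqrow hother]
    rw [hre]; simp

theorem InB_iff2 (g : List (List String)) (C : Nat) (a b : Int × Int) (u v : String) (x : Int × Int) :
    InB (setZ (setZ g a u) b v) C x ↔ InB g C x := by
  rw [InB_setZ, InB_setZ]

theorem InB_iff3 (g : List (List String)) (C : Nat) (a b c : Int × Int) (u v w : String) (x : Int × Int) :
    InB (setZ (setZ (setZ g a u) b v) c w) C x ↔ InB g C x := by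
  rw [InB_setZ, InB_setZ, InB_setZ]

-- after the robot moves to an empty cell: grid = setZ (setZ g t "@") r "."
theorem step_inv2 {g : List (List String)} {C : Nat} (inv : GInv g C) {r t : Int × Int}
    (hr : RobotAt g C r) (htIn : InB g C t) (hrt : r ≠ t)
    (htc : cellZ g t ≠ "#") :
    GInv (setZ (setZ g t "@") r ".") C ∧ RobotAt (setZ (setZ g t "@") r ".") C t := by
  obtain ⟨hrIn, hrat⟩ := hr
  have hrect1 : Rect (setZ g t "@") C := rect_setZ inv.rect t "@"
  have hcellN : ∀ p : Int × Int, 0 ≤ p.1 → 0 ≤ p.2 →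
      cellZ (setZ (setZ g t "@") r ".") p =
        if p = r then "." else if p = t then "@" else cellZ g p := by
    intro p hp1 hp2
    rw [cellZ_setZ' hrect1 (by rw [InB_setZ]; exact hrIn) hp1 hp2]
    by_cases hpr : p = r
    · rw [if_pos hpr, if_pos hpr]
    · rw [if_neg hpr, if_neg hpr, cellZ_setZ' inv.rect htIn hp1 hp2]
  have hrint : ¬ (r.1 = 0 ∨ r.1 = (g.length : Int) - 1 ∨ r.2 = 0 ∨ r.2 = (C : Int) - 1) :=
    fun hb => absurd (inv.border r hrIn hb) (by rw [hrat]; decide)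
  have htint : ¬ (t.1 = 0 ∨ t.1 = (g.length : Int) - 1 ∨ t.2 = 0 ∨ t.2 = (C : Int) - 1) :=
    fun hb => absurd (inv.border t htIn hb) htc
  have hlen : (setZ (setZ g t "@") r ".").length = g.length := by
    rw [length_setZ, length_setZ]
  refine ⟨⟨?_, ?_, ?_, ?_, ?_⟩, ?_, ?_⟩
  · exact rect_setZ hrect1 r "."
  · rw [head_setZ, head_setZ]; exact inv.head
  · intro p hIn
    have hIng : InB g C p := (InB_iff2 g C t r "@" "." p).mp hIn
    rw [hcellN p hIng.1 hIng.2.2.1]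
    by_cases h1 : p = r
    · rw [if_pos h1]; right; left; rfl
    · rw [if_neg h1]
      by_cases h2 : p = t
      · rw [if_pos h2]; right; right; right; rfl
      · rw [if_neg h2]; exact inv.alpha p hIng
  · intro p hIn hb
    have hIng : InB g C p := (InB_iff2 g C t r "@" "." p).mp hIn
    rw [hlen] at hb
    have hpr : p ≠ r := fun hc => hrint (hc ▸ hb)
    have hpt : p ≠ t := fun hc => htint (hc ▸ hb)
    rw [hcellN p hIng.1 hIng.2.2.1, if_neg hpr, if_neg hpt]
    exact inv.border p hIng hb
  · intro p p' hIn hIn' hat hat'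
    have hIng : InB g C p := (InB_iff2 g C t r "@" "." p).mp hIn
    have hIng' : InB g C p' := (InB_iff2 g C t r "@" "." p').mp hIn'
    have hmain : ∀ x : Int × Int, InB g C x →
        cellZ (setZ (setZ g t "@") r ".") x = "@" → x = t := by
      intro x hx hcx
      rw [hcellN x hx.1 hx.2.2.1] at hcx
      by_cases hx1 : x = r
      · rw [if_pos hx1] at hcx; exact absurd hcx (by decide)
      · rw [if_neg hx1] at hcx
        by_cases hx2 : x = t
        · exact hx2
        · rw [if_neg hx2] at hcx
          exact absurd (inv.uniq x r hx hrIn hcx hrat) hx1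
    rw [hmain p hIng hat, hmain p' hIng' hat']
  · exact (InB_iff2 g C t r "@" "." t).mpr htIn
  · rw [hcellN t htIn.1 htIn.2.2.1, if_neg (Ne.symm hrt), if_pos rfl]

-- after a successful push: grid = setZ (setZ (setZ g t "@") q "O") r "."
theorem step_inv3 {g : List (List String)} {C : Nat} (inv : GInv g C) {r t q : Int × Int}
    (hr : RobotAt g C r) (htIn : InB g C t) (hqIn : InB g C q)
    (hrt : r ≠ t) (htq : t ≠ q)
    (htO : cellZ g t = "O") (hqdot : cellZ g q = ".") :
    GInv (setZ (setZ (setZ g t "@") q "O") r ".") C ∧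
      RobotAt (setZ (setZ (setZ g t "@") q "O") r ".") C t := by
  obtain ⟨hrIn, hrat⟩ := hr
  have hrect1 : Rect (setZ g t "@") C := rect_setZ inv.rect t "@"
  have hrect2 : Rect (setZ (setZ g t "@") q "O") C := rect_setZ hrect1 q "O"
  have hcellN : ∀ p : Int × Int, 0 ≤ p.1 → 0 ≤ p.2 →
      cellZ (setZ (setZ (setZ g t "@") q "O") r ".") p =
        if p = r then "." else if p = q then "O" else if p = t then "@" else cellZ g p := by
    intro p hp1 hp2
    rw [cellZ_setZ' hrect2 (by rw [InB_setZ, InB_setZ]; exact hrIn) hp1 hp2]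
    by_cases hpr : p = r
    · rw [if_pos hpr, if_pos hpr]
    · rw [if_neg hpr, if_neg hpr,
        cellZ_setZ' hrect1 (by rw [InB_setZ]; exact hqIn) hp1 hp2]
      by_cases hpq : p = q
      · rw [if_pos hpq, if_pos hpq]
      · rw [if_neg hpq, if_neg hpq, cellZ_setZ' inv.rect htIn hp1 hp2]
  have hrint : ¬ (r.1 = 0 ∨ r.1 = (g.length : Int) - 1 ∨ r.2 = 0 ∨ r.2 = (C : Int) - 1) :=
    fun hb => absurd (inv.border r hrIn hb) (by rw [hrat]; decide)
  have htint : ¬ (t.1 = 0 ∨ t.1 = (g.length : Int) - 1 ∨ t.2 = 0 ∨ t.2 = (C : Int) - 1) :=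
    fun hb => absurd (inv.border t htIn hb) (by rw [htO]; decide)
  have hqint : ¬ (q.1 = 0 ∨ q.1 = (g.length : Int) - 1 ∨ q.2 = 0 ∨ q.2 = (C : Int) - 1) :=
    fun hb => absurd (inv.border q hqIn hb) (by rw [hqdot]; decide)
  have hlen : (setZ (setZ (setZ g t "@") q "O") r ".").length = g.length := by
    rw [length_setZ, length_setZ, length_setZ]
  refine ⟨⟨?_, ?_, ?_, ?_, ?_⟩, ?_, ?_⟩
  · exact rect_setZ hrect2 r "."
  · rw [head_setZ, head_setZ, head_setZ]; exact inv.head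
  · intro p hIn
    have hIng : InB g C p := (InB_iff3 g C t q r "@" "O" "." p).mp hIn
    rw [hcellN p hIng.1 hIng.2.2.1]
    by_cases h1 : p = r
    · rw [if_pos h1]; right; left; rfl
    · rw [if_neg h1]
      by_cases h2 : p = q
      · rw [if_pos h2]; right; right; left; rfl
      · rw [if_neg h2]
        by_cases h3 : p = t
        · rw [if_pos h3]; right; right; right; rfl
        · rw [if_neg h3]; exact inv.alpha p hIng
  · intro p hIn hb
    have hIng : InB g C p := (InB_iff3 g C t q r "@" "O" "." p).mp hIn
    rw [hlen] at hb
    have hpr : p ≠ r := fun hc => hrint (hc ▸ hb)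
    have hpt : p ≠ t := fun hc => htint (hc ▸ hb)
    have hpq : p ≠ q := fun hc => hqint (hc ▸ hb)
    rw [hcellN p hIng.1 hIng.2.2.1, if_neg hpr, if_neg hpq, if_neg hpt]
    exact inv.border p hIng hb
  · intro p p' hIn hIn' hat hat'
    have hIng : InB g C p := (InB_iff3 g C t q r "@" "O" "." p).mp hIn
    have hIng' : InB g C p' := (InB_iff3 g C t q r "@" "O" "." p').mp hIn'
    have hmain : ∀ x : Int × Int, InB g C x →
        cellZ (setZ (setZ (setZ g t "@") q "O") r ".") x = "@" → x = t := by
      intro x hx hcx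
      rw [hcellN x hx.1 hx.2.2.1] at hcx
      by_cases hx1 : x = r
      · rw [if_pos hx1] at hcx; exact absurd hcx (by decide)
      · rw [if_neg hx1] at hcx
        by_cases hx2 : x = q
        · rw [if_pos hx2] at hcx; exact absurd hcx (by decide)
        · rw [if_neg hx2] at hcx
          by_cases hx3 : x = t
          · exact hx3
          · rw [if_neg hx3] at hcx
            exact absurd (inv.uniq x r hx hrIn hcx hrat) hx1
    rw [hmain p hIng hat, hmain p' hIng' hat']
  · exact (InB_iff3 g C t q r "@" "O" "." t).mpr htIn
  · rw [hcellN t htIn.1 htIn.2.2.1, if_neg (Ne.symm hrt), if_neg htq, if_pos rfl]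

theorem pyCell_eq' (g : List (List String)) {a b : Int} (h1 : 0 ≤ a) (h2 : 0 ≤ b) :
    pyCell g a b = cellZ g (a, b) := pyCell_eq g (p := (a, b)) h1 h2

theorem pySet2_eq' (g : List (List String)) {a b : Int} (h1 : 0 ≤ a) (h2 : 0 ≤ b) (v : String) :
    pySet2 g a b v = setZ g (a, b) v := pySet2_eq g (p := (a, b)) h1 h2 v

theorem step_eq {g : List (List String)} {C : Nat} (inv : GInv g C) {r : Int × Int}
    (hr : RobotAt g C r) {m : Char} {dx dy : Int} (hm : movesDelta m = some (dx, dy)) :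
    moveRobotA g m = (stepB (g, r) m).1 ∧ GInv (stepB (g, r) m).1 C ∧
      RobotAt (stepB (g, r) m).1 C (stepB (g, r) m).2 := by
  have hd := movesDelta_dir hm
  obtain ⟨hfA, hfB⟩ := findRobot_eq inv hr
  obtain ⟨hrIn, hrat⟩ := hr
  obtain ⟨h1, h2, h3, h4⟩ := hrIn
  -- the robot is interior: its cell is '@', not the border's '#'
  have hint : ¬ (r.1 = 0 ∨ r.1 = (g.length : Int) - 1 ∨ r.2 = 0 ∨ r.2 = (C : Int) - 1) := by
    intro hb
    exact absurd (inv.border r ⟨h1, h2, h3, h4⟩ hb) (by rw [hrat]; decide)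
  set t : Int × Int := (r.1 + dx, r.2 + dy) with htdef
  have htIn : InB g C t := by
    rcases hd with h | h | h | h <;> rw [Prod.ext_iff] at h <;> obtain ⟨e1, e2⟩ := h <;>
      subst e1 <;> subst e2 <;>
      exact ⟨by simp [htdef]; omega, by simp [htdef]; omega, by simp [htdef]; omega,
        by simp [htdef]; omega⟩
  have hrt : r ≠ t := by
    intro hc
    rw [htdef, Prod.ext_iff] at hc
    rcases hd with h | h | h | h <;> rw [Prod.ext_iff] at h <;> obtain ⟨e1, e2⟩ := h <;>
      subst e1 <;> subst e2 <;> simp at hc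
  obtain ⟨n, q, hray, hn⟩ := ray_exists inv hd t htIn
  have hfuel : n < g.length + (g.headD []).length + 2 := by rw [inv.head]; omega
  have hfree : scanFreeB g dx dy (g.length + (g.headD []).length + 2) t.1 t.2 = q :=
    scanFreeB_ray hray _ hfuel
  have hqfacts := ray_last hray
  have hq := ray_q hray
  rcases hqfacts with ⟨hqIn, hqO⟩
  have hfA' : findRobotA g 0 none = some (r.1, r.2) := by rw [hfA]
  have hfree' : scanFreeB g dx dy (g.length + (g.headD []).length + 2)
      (r.1 + dx) (r.2 + dy) = q := hfree
  have hpy : pyCell g (r.1 + dx) (r.2 + dy) = cellZ g t := by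
    rw [pyCell_eq' g htIn.1 htIn.2.2.1]
  have hpyq : pyCell g q.1 q.2 = cellZ g q := by
    rw [pyCell_eq' g hqIn.1 hqIn.2.2.1]
  by_cases hHash : cellZ g t = "#"
  · -- a wall: both sides leave everything unchanged
    have hqt : q = t := (ray_stop_of_not_O hray (by rw [hHash]; decide)).1
    have hB : stepB (g, r) m = (g, r) := by
      simp only [stepB, hm, hfree']
      rw [hpyq, hqt, hHash]
      simp
    rw [hB]
    exact ⟨by simp only [moveRobotA, hfA', hm]; rw [hpy, if_pos hHash], inv,
      ⟨h1, h2, h3, h4⟩, hrat⟩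
  · by_cases hDot : cellZ g t = "."
    · -- an empty cell: the robot steps into it
      have hqt : q = t := (ray_stop_of_not_O hray (by rw [hDot]; decide)).1
      have hB : stepB (g, r) m =
          (pySet2 (pySet2 g (r.1 + dx) (r.2 + dy) "@") r.1 r.2 ".", (r.1 + dx, r.2 + dy)) := by
        simp only [stepB, hm, hfree']
        rw [hpyq, hqt, hDot, if_pos rfl, if_neg (by simp [htdef])]
      have hgridB : pySet2 (pySet2 g (r.1 + dx) (r.2 + dy) "@") r.1 r.2 "." =
          setZ (setZ g t "@") r "." := by
        rw [pySet2_eq' g htIn.1 htIn.2.2.1, pySet2_eq' _ h1 h3]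
      have hgridA : pySet2 (pySet2 g r.1 r.2 ".") (r.1 + dx) (r.2 + dy) "@" =
          setZ (setZ g t "@") r "." := by
        rw [pySet2_eq' g h1 h3, pySet2_eq' _ htIn.1 htIn.2.2.1, ← htdef]
        exact setZ_comm g h1 h3 htIn.1 htIn.2.2.1 hrt "." "@"
      obtain ⟨hinvN, hrobN⟩ := step_inv2 inv ⟨⟨h1, h2, h3, h4⟩, hrat⟩ htIn hrt
        (by rw [hDot]; decide)
      rw [hB]
      refine ⟨?_, by simpa using hgridB ▸ hinvN, by simpa using hgridB ▸ hrobN⟩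
      simp only [moveRobotA, hfA', hm]
      rw [hpy, if_neg hHash, if_pos hDot, hgridA, ← hgridB]
    · by_cases hO' : cellZ g t = "O"
      · -- a box line: scan to the first free cell
        have hn1 : 1 ≤ n := ray_pos_of_O hray hO'
        have hrq : r ≠ q := by
          intro hcontra
          rw [hq, htdef] at hcontra
          rcases hd with h | h | h | h <;> rw [Prod.ext_iff] at h <;> obtain ⟨e1, e2⟩ := h <;>
            subst e1 <;> subst e2 <;> rw [Prod.ext_iff] at hcontra <;>
            simp [pAdd] at hcontra <;> omega
        have htq : t ≠ q := by
          intro hcontra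
          have h0 : pAdd t 0 dx dy = pAdd t n dx dy := by rw [pAdd_zero, ← hq]; exact hcontra
          have := pAdd_inj hd h0
          omega
        by_cases hqH : cellZ g q = "#"
        · -- blocked push: both sides do nothing
          have hscanN : scanBoxesA g dx dy (g.length + (g.headD []).length + 2)
              (r.1 + dx) (r.2 + dy) = none := (scanA_ray inv hray _ hfuel).1 hO' hqH
          have hB : stepB (g, r) m = (g, r) := by
            simp only [stepB, hm, hfree']
            rw [hpyq, hqH]
            simp
          rw [hB]
          refine ⟨?_, inv, ⟨h1, h2, h3, h4⟩, hrat⟩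
          simp only [moveRobotA, hfA', hm]
          rw [hpy, if_neg hHash, if_neg hDot, if_pos hO', hscanN]
        · -- successful push
          have hqdot : cellZ g q = "." := by
            rcases inv.alpha q hqIn with h | h | h | h
            · exact absurd h hqH
            · exact h
            · exact absurd h hqO
            · exact absurd (inv.uniq q r hqIn ⟨h1, h2, h3, h4⟩ h hrat) (Ne.symm hrq)
          have hscanS : scanBoxesA g dx dy (g.length + (g.headD []).length + 2)
              (r.1 + dx) (r.2 + dy) =
              some ((List.range n).map (fun k => pAdd t k dx dy),
                    (List.range n).map (fun k => pAdd t (k + 1) dx dy)) :=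
            (scanA_ray inv hray _ hfuel).2 hqH
          have hInAll : ∀ k : Nat, k ≤ n → InB g C (pAdd t k dx dy) := by
            intro k hk
            rcases Nat.lt_or_ge k n with hlt | hge
            · exact (ray_cells hray k hlt).2
            · have : k = n := by omega
              subst this
              rw [← hq]
              exact hqIn
          have hOAll : ∀ k : Nat, k < n → cellZ g (pAdd t k dx dy) = "O" :=
            fun k hk => (ray_cells hray k hk).1
          have hnet := writes_net hd n t g C inv.rect hInAll hOAll hn1
          have hfd : ((List.range n).map (fun k => pAdd t k dx dy)).foldl
              (fun h p => pySet2 h p.1 p.2 ".") g =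
              ((List.range n).map (fun k => pAdd t k dx dy)).foldl
                (fun h p => setZ h p ".") g := by
            refine foldl_pySet2_eq "." _ g ?_
            intro x hx
            simp only [List.mem_map, List.mem_range] at hx
            obtain ⟨k, hk, hkx⟩ := hx
            subst hkx
            exact ⟨(hInAll k (by omega)).1, (hInAll k (by omega)).2.2.1⟩
          have hfo : ∀ h0, ((List.range n).map (fun k => pAdd t (k + 1) dx dy)).foldl
              (fun h p => pySet2 h p.1 p.2 "O") h0 =
              ((List.range n).map (fun k => pAdd t (k + 1) dx dy)).foldl
                (fun h p => setZ h p "O") h0 := by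
            intro h0
            refine foldl_pySet2_eq "O" _ h0 ?_
            intro x hx
            simp only [List.mem_map, List.mem_range] at hx
            obtain ⟨k, hk, hkx⟩ := hx
            subst hkx
            exact ⟨(hInAll (k + 1) (by omega)).1, (hInAll (k + 1) (by omega)).2.2.1⟩
          have hpush : ((List.range n).map (fun k => pAdd t (k + 1) dx dy)).foldl
              (fun h p => pySet2 h p.1 p.2 "O")
              (((List.range n).map (fun k => pAdd t k dx dy)).foldl
                (fun h p => pySet2 h p.1 p.2 ".") g) =
              setZ (setZ g t ".") q "O" := by
            rw [hfd, hfo, hnet, hq]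
          have hgridA : pySet2 (pySet2 (setZ (setZ g t ".") q "O") r.1 r.2 ".")
              (r.1 + dx) (r.2 + dy) "@" = setZ (setZ (setZ g t "@") q "O") r "." := by
            rw [pySet2_eq' _ h1 h3, pySet2_eq' _ htIn.1 htIn.2.2.1, ← htdef]
            rw [setZ_comm _ h1 h3 htIn.1 htIn.2.2.1 hrt "." "@"]
            rw [setZ_comm (setZ g t ".") hqIn.1 hqIn.2.2.1 htIn.1 htIn.2.2.1 (Ne.symm htq)
              "O" "@"]
            rw [setZ_setZ_self]
          have hB : stepB (g, r) m =
              (pySet2 (pySet2 (pySet2 g q.1 q.2 "O") (r.1 + dx) (r.2 + dy) "@")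
                r.1 r.2 ".", (r.1 + dx, r.2 + dy)) := by
            simp only [stepB, hm, hfree']
            rw [hpyq, hqdot, if_pos rfl, if_pos (by rw [Prod.mk.eta, ← htdef]; exact Ne.symm htq)]
          have hgridB : pySet2 (pySet2 (pySet2 g q.1 q.2 "O") (r.1 + dx) (r.2 + dy) "@")
              r.1 r.2 "." = setZ (setZ (setZ g t "@") q "O") r "." := by
            rw [pySet2_eq' g hqIn.1 hqIn.2.2.1, pySet2_eq' _ htIn.1 htIn.2.2.1,
              pySet2_eq' _ h1 h3, ← htdef, Prod.mk.eta]
            rw [setZ_comm g hqIn.1 hqIn.2.2.1 htIn.1 htIn.2.2.1 (Ne.symm htq) "O" "@"]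
          obtain ⟨hinvN, hrobN⟩ := step_inv3 inv ⟨⟨h1, h2, h3, h4⟩, hrat⟩ htIn hqIn hrt htq
            hO' hqdot
          rw [hB]
          refine ⟨?_, by simpa using hgridB ▸ hinvN, by simpa using hgridB ▸ hrobN⟩
          simp only [moveRobotA, hfA', hm]
          rw [hpy, if_neg hHash, if_neg hDot, if_pos hO', hscanS]
          simp only []
          rw [hpush, hgridA, ← hgridB]
      · -- the only remaining cell value is '@', impossible next to the unique robot
        exfalso
        rcases inv.alpha t htIn with h | h | h | h
        · exact hHash h
        · exact hDot h
        · exact hO' h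
        · exact hrt (inv.uniq r t ⟨h1, h2, h3, h4⟩ htIn hrat h)


-- ---- at most one robot: from the flattened count to positional uniqueness ----

theorem sum_two_le : ∀ (l : List Nat) (i j : Nat) (hi : i < l.length) (hj : j < l.length),
    i ≠ j → l[i] + l[j] ≤ l.sum := by
  intro l
  induction l with
  | nil => intro i j hi; simp at hi
  | cons x xs ih =>
    intro i j hi hj hne
    cases i with
    | zero =>
      cases j with
      | zero => omega
      | succ j =>
        simp only [List.getElem_cons_zero, List.getElem_cons_succ, List.sum_cons]
        have hb : j < xs.length := by simpa using hj
        have : xs[j] ≤ xs.sum := List.le_sum_of_mem (List.getElem_mem hb)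
        omega
    | succ i =>
      cases j with
      | zero =>
        simp only [List.getElem_cons_zero, List.getElem_cons_succ, List.sum_cons]
        have hb : i < xs.length := by simpa using hi
        have : xs[i] ≤ xs.sum := List.le_sum_of_mem (List.getElem_mem hb)
        omega
      | succ j =>
        simp only [List.getElem_cons_succ, List.sum_cons]
        have := ih i j (by simpa using hi) (by simpa using hj) (by omega)
        omega

theorem two_le_count_row : ∀ (l : List String) (i j : Nat) (hi : i < l.length)
    (hj : j < l.length), i ≠ j → l[i] = "@" → l[j] = "@" → 2 ≤ l.count "@" := by
  intro l i j hi hj hne hati hatj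
  rcases Nat.lt_or_ge i j with hlt | hge
  · rw [← List.take_append_drop j l, List.count_append]
    have hc1 : 0 < (l.take j).count "@" := by
      refine List.count_pos_iff.mpr (List.mem_iff_getElem.mpr ⟨i, by simp; omega, ?_⟩)
      exact List.getElem_take.trans hati
    have hc2 : 0 < (l.drop j).count "@" := by
      refine List.count_pos_iff.mpr (List.mem_iff_getElem.mpr ⟨0, by simp; omega, ?_⟩)
      simpa using hatj
    omega
  · have hlt : j < i := by omega
    rw [← List.take_append_drop i l, List.count_append]
    have hc1 : 0 < (l.take i).count "@" := by
      refine List.count_pos_iff.mpr (List.mem_iff_getElem.mpr ⟨j, by simp; omega, ?_⟩)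
      exact List.getElem_take.trans hatj
    have hc2 : 0 < (l.drop i).count "@" := by
      refine List.count_pos_iff.mpr (List.mem_iff_getElem.mpr ⟨0, by simp; omega, ?_⟩)
      simpa using hati
    omega

theorem uniq_of_count {g : List (List String)} {C : Nat} (hrect : Rect g C)
    (hcount : g.flatten.count "@" ≤ 1) :
    ∀ p q, InB g C p → InB g C q → cellZ g p = "@" → cellZ g q = "@" → p = q := by
  intro p q hp hq hatp hatq
  obtain ⟨hp1, hp2, hp3, hp4⟩ := hp
  obtain ⟨hq1, hq2, hq3, hq4⟩ := hq
  have hip : p.1.toNat < g.length := by omega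
  have hiq : q.1.toNat < g.length := by omega
  have hjp : p.2.toNat < g[p.1.toNat].length := by
    rw [hrect _ (List.getElem_mem hip)]; omega
  have hjq : q.2.toNat < g[q.1.toNat].length := by
    rw [hrect _ (List.getElem_mem hiq)]; omega
  have hgetp : g[p.1.toNat][p.2.toNat] = "@" := by
    rw [← hatp]
    simp [cellZ, List.getD_eq_getElem?_getD, List.getElem?_eq_getElem hip,
      List.getElem?_eq_getElem hjp]
  have hgetq : g[q.1.toNat][q.2.toNat] = "@" := by
    rw [← hatq]
    simp [cellZ, List.getD_eq_getElem?_getD, List.getElem?_eq_getElem hiq,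
      List.getElem?_eq_getElem hjq]
  rw [List.count_flatten] at hcount
  by_cases hii : p.1.toNat = q.1.toNat
  · by_cases hjj : p.2.toNat = q.2.toNat
    · refine Prod.ext ?_ ?_ <;> omega
    · exfalso
      have hjq' : q.2.toNat < g[p.1.toNat].length := by
        rw [hrect _ (List.getElem_mem hip)]; omega
      have hgetq2 : g[p.1.toNat][q.2.toNat]'hjq' = "@" := by
        simp only [hii]
        exact hgetq
      have h2c : 2 ≤ g[p.1.toNat].count "@" :=
        two_le_count_row _ p.2.toNat q.2.toNat hjp hjq' hjj hgetp hgetq2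
      have hle : g[p.1.toNat].count "@" ≤ (g.map (List.count "@")).sum := by
        refine List.le_sum_of_mem ?_
        exact List.mem_map_of_mem (List.getElem_mem hip)
      omega
  · exfalso
    have hc1 : 0 < (g.map (List.count "@"))[p.1.toNat]'(by simpa) := by
      simp only [List.getElem_map]
      exact List.count_pos_iff.mpr (List.mem_iff_getElem.mpr ⟨p.2.toNat, hjp, hgetp⟩)
    have hc2 : 0 < (g.map (List.count "@"))[q.1.toNat]'(by simpa) := by
      simp only [List.getElem_map]
      exact List.count_pos_iff.mpr (List.mem_iff_getElem.mpr ⟨q.2.toNat, hjq, hgetq⟩)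
    have := sum_two_le (g.map (List.count "@")) p.1.toNat q.1.toNat (by simpa) (by simpa) hii
    omega

-- ---- the invariant holds initially on any well-formed input ----

theorem headD_eq_getElem (row : List String) (h : row ≠ []) :
    row.headD "" = row[0]'(List.length_pos_iff.mpr h) := by
  cases row with
  | nil => exact absurd rfl h
  | cons a l => simp

theorem GInv_init {g : List (List String)}
    (p1 : ∀ row ∈ g, row.length = (g.headD []).length)
    (p2 : ∀ row ∈ g, ∀ c ∈ row, c = "#" ∨ c = "." ∨ c = "O" ∨ c = "@")
    (p3 : g ≠ [] → (g.headD []).all (· = "#") ∧ (g.getLastD []).all (· = "#"))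
    (p4 : ∀ row ∈ g, row ≠ [] → row.headD "" = "#" ∧ row.getLastD "" = "#")
    (p5 : g.flatten.count "@" ≤ 1) :
    GInv g (g.headD []).length := by
  have hcell : ∀ (p : Int × Int), InB g (g.headD []).length p →
      ∃ (hi : p.1.toNat < g.length) (hj : p.2.toNat < g[p.1.toNat].length),
        cellZ g p = g[p.1.toNat][p.2.toNat] := by
    intro p hp
    obtain ⟨hp1, hp2, hp3, hp4⟩ := hp
    have hi : p.1.toNat < g.length := by omega
    have hj : p.2.toNat < g[p.1.toNat].length := by
      rw [p1 _ (List.getElem_mem hi)]; omega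
    exact ⟨hi, hj, by
      simp [cellZ, List.getD_eq_getElem?_getD, List.getElem?_eq_getElem hi,
        List.getElem?_eq_getElem hj]⟩
  refine ⟨p1, rfl, ?_, ?_, uniq_of_count p1 p5⟩
  · intro p hp
    obtain ⟨hi, hj, hc⟩ := hcell p hp
    rw [hc]
    exact p2 _ (List.getElem_mem hi) _ (List.getElem_mem hj)
  · intro p hp hb
    obtain ⟨hp1, hp2, hp3, hp4⟩ := hp
    obtain ⟨hi, hj, hc⟩ := hcell p ⟨hp1, hp2, hp3, hp4⟩
    have hgne : g ≠ [] := by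
      intro hc0; rw [hc0] at hi; simp at hi
    have hhead : g.headD [] = g[0]'(by have := List.length_pos_iff.mpr hgne; omega) := by
      cases g with
      | nil => exact absurd rfl hgne
      | cons a l => simp
    rw [hc]
    rcases hb with hb | hb | hb | hb
    · -- first row
      have hi0 : p.1.toNat = 0 := by omega
      have := (p3 hgne).1
      rw [List.all_eq_true] at this
      have hmem : g[p.1.toNat][p.2.toNat] ∈ g.headD [] := by
        rw [hhead]
        have : p.1.toNat = 0 := hi0
        simp only [this] at hj ⊢
        exact List.getElem_mem hj
      simpa using this _ hmem
    · -- last row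
      have hi0 : p.1.toNat = g.length - 1 := by omega
      have hlast : g.getLastD [] = g[g.length - 1]'(by have := List.length_pos_iff.mpr hgne; omega) := by
        rw [List.getLastD_eq_getLast?, List.getLast?_eq_getElem?,
          List.getElem?_eq_getElem (by have := List.length_pos_iff.mpr hgne; omega)]
        rfl
      have := (p3 hgne).2
      rw [List.all_eq_true] at this
      have hmem : g[p.1.toNat][p.2.toNat] ∈ g.getLastD [] := by
        rw [hlast]
        simp only [hi0] at hj ⊢
        exact List.getElem_mem hj
      simpa using this _ hmem
    · -- first column
      have hj0 : p.2.toNat = 0 := by omega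
      have hrne : g[p.1.toNat] ≠ [] := by
        intro hc0; rw [hc0] at hj; simp at hj
      have hval := (p4 _ (List.getElem_mem hi) hrne).1
      rw [headD_eq_getElem _ hrne] at hval
      simp only [hj0]
      exact hval
    · -- last column
      have hj0 : p.2.toNat = g[p.1.toNat].length - 1 := by
        rw [p1 _ (List.getElem_mem hi)]; omega
      have hrne : g[p.1.toNat] ≠ [] := by
        intro hc0; rw [hc0] at hj; simp at hj
      have := (p4 _ (List.getElem_mem hi) hrne).2
      rw [← this, List.getLastD_eq_getLast?, List.getLast?_eq_getElem?,
        List.getElem?_eq_getElem (by omega)]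
      simp [hj0]

-- ---- folding the whole move sequence ----

theorem foldA_id {g : List (List String)} (hno : ∀ row ∈ g, "@" ∉ row) :
    ∀ (ms : List Char), ms.foldl (fun h m => moveRobotA h m) g = g := by
  intro ms
  induction ms with
  | nil => rfl
  | cons c cs ih =>
    have hstep : moveRobotA g c = g := by
      simp only [moveRobotA, findRobotA_none g hno 0 none]
    simp only [List.foldl_cons, hstep]
    exact ih

theorem fold_eq {C : Nat} : ∀ (ms : List Char) (g : List (List String)) (r : Int × Int),
    GInv g C → RobotAt g C r → (∀ c ∈ ms, c = '<' ∨ c = '>' ∨ c = '^' ∨ c = 'v') →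
    ms.foldl (fun h m => moveRobotA h m) g = (ms.foldl stepB (g, r)).1 ∧
      GInv (ms.foldl stepB (g, r)).1 C ∧
      RobotAt (ms.foldl stepB (g, r)).1 C (ms.foldl stepB (g, r)).2 := by
  intro ms
  induction ms with
  | nil => intro g r inv hr _; exact ⟨rfl, inv, hr⟩
  | cons c cs ih =>
    intro g r inv hr hval
    have hdelta : ∃ dx dy, movesDelta c = some (dx, dy) := by
      rcases hval c (by simp) with h | h | h | h <;> subst h
      · exact ⟨0, -1, rfl⟩
      · exact ⟨0, 1, rfl⟩
      · exact ⟨-1, 0, rfl⟩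
      · exact ⟨1, 0, rfl⟩
    obtain ⟨dx, dy, hm⟩ := hdelta
    obtain ⟨hs1, hs2, hs3⟩ := step_eq inv hr hm
    have hpair : ((stepB (g, r) c).1, (stepB (g, r) c).2) = stepB (g, r) c := rfl
    have := ih (stepB (g, r) c).1 (stepB (g, r) c).2 hs2 hs3
      (fun x hx => hval x (by simp [hx]))
    rw [hpair] at this
    simp only [List.foldl_cons, hs1]
    exact this

-- ===== VERDICT (by name: the statement is the Claim_ definition above) =====
theorem part1_spec : Claim_equal_part1 := by
  unfold Claim_equal_part1
  intro data _ hpre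
  unfold Spec_part1
  by_cases hex : ∃ row ∈ data.1, "@" ∈ row
  · -- a robot exists
    obtain ⟨row, hrow, hmem⟩ := hex
    rcases hpre (List.mem_flatten.mpr ⟨row, hrow, hmem⟩) with hempty | hwf
    · -- no moves: both sides just score the untouched grid
      simp only [part1, part1_alt, hempty, List.foldl_nil]
      cases findRobotB data.1 0 none with
      | none => exact sum_eq _ 0
      | some r => exact sum_eq _ 0
    · obtain ⟨p1, p2, p3, p4, p5, p6⟩ := hwf
      have inv : GInv data.1 (data.1.headD []).length := GInv_init p1 p2 p3 p4 p5
      obtain ⟨i0, hi0, hrowe⟩ := List.mem_iff_getElem.mp hrow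
      rw [← hrowe] at hmem
      obtain ⟨j0, hj0, hate⟩ := List.mem_iff_getElem.mp hmem
      have hj0C : j0 < (data.1.headD []).length := by
        rw [← p1 _ hrow, ← hrowe]; exact hj0
      have hrobot : RobotAt data.1 (data.1.headD []).length ((i0 : Int), (j0 : Int)) := by
        refine ⟨⟨by simp, ?_, by simp, ?_⟩, ?_⟩
        · show (i0 : Int) < (data.1.length : Int)
          exact_mod_cast hi0
        · show (j0 : Int) < ((data.1.headD []).length : Int)
          exact_mod_cast hj0C
        simp [cellZ, List.getD_eq_getElem?_getD, List.getElem?_eq_getElem hi0,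
          List.getElem?_eq_getElem hj0]
        exact hate
      have hval : ∀ c ∈ data.2.toList, c = '<' ∨ c = '>' ∨ c = '^' ∨ c = 'v' := by
        intro c hc
        have := List.all_eq_true.mp p6 c hc
        simp at this
        tauto
      obtain ⟨hfold, _, _⟩ := fold_eq data.2.toList data.1 ((i0 : Int), (j0 : Int))
        inv hrobot hval
      obtain ⟨_, hfb⟩ := findRobot_eq inv hrobot
      simp only [part1, part1_alt, hfb]
      rw [hfold]
      exact sum_eq _ 0
  · -- no robot: the grid never changes
    have hno : ∀ row ∈ data.1, "@" ∉ row := by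
      intro row hrow hmem
      exact hex ⟨row, hrow, hmem⟩
    simp only [part1, part1_alt, findRobotB_none data.1 hno 0 none]
    rw [foldA_id hno]
    exact sum_eq _ 0
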